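-- pv_equiv track=rewrite | github.com/BuiVannn/Python---PTIT | py02062.py | has_square_subarray
-- ===== SOURCE A (Python) =====
-- def prefix_function(A):
--     """
--     Tính mảng pi (prefix function) trong O(n).
--     pi[i] là độ dài border (tiền tố = hậu tố) lớn nhất của đoạn A[0..i].
--     """
--     n = len(A)
--     pi = [0] * n
--     j = 0
--     for i in range(1, n):
--         while j > 0 and A[i] != A[j]:
--             j = pi[j - 1]
--         if A[i] == A[j]:
--             j += 1
--         pi[i] = j
--     return pi
--
-- def has_square_subarray(A):
--     pi = prefix_function(A)
--     n = len(A)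
--
--     for i in range(n):
--         length = i + 1   # prefix [0..i] có độ dài = length
--         p = pi[i]
--
--         # 'Lùi' qua các border (p) nhỏ dần
--         while p > 0:
--             # period = length - p
--             # subSquareLen = 2 * period
--             subSquareLen = 2 * (length - p)  # cỡ khối lặp có thể
--             if subSquareLen <= length:
--                 # subSquareLen là độ dài 1 "khối lặp" kết thúc tại i
--                 # Nếu >= 2 => ta tìm được subarray XX (độ dài >= 2)
--                 if subSquareLen >= 2:
--                     return True
--             # Thử border bé hơn
--             p = pi[p - 1]
--
--     return False
-- ===== SOURCE B (Python) =====
-- def has_square_subarray(A):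
--     n = len(A)
--     pi = [0] * n
--     j = 0
--     for i in range(1, n):
--         while j > 0 and A[i] != A[j]:
--             j = pi[j - 1]
--         if A[i] == A[j]:
--             j += 1
--         pi[i] = j
--         if j > 0 and 2 * j >= i + 1:
--             return True
--     return False
-- ===== Notes on version B (the rewrite author's own statement) =====
-- stated objective: alternative
-- what changed: B fuses the square detection into the single prefix-function pass with an early return, testing only the maximal border per index (i+1 <= 2*pi[i]), instead of A's separate second pass that walks the whole border chain of every index.
import Mathlib
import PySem

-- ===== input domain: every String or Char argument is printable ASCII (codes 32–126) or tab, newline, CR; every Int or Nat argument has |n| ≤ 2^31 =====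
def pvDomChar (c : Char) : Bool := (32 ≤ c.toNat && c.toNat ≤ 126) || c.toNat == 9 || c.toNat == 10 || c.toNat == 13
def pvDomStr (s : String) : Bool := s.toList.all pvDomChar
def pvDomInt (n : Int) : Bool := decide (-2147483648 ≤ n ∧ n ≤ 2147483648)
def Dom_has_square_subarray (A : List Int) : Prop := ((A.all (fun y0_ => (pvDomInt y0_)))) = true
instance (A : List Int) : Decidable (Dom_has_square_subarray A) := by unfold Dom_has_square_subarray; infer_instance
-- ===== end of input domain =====

-- B fuses the square check into the single prefix-function pass, testing only the maximal
-- border per index and returning early, instead of A's second pass with a per-index border-chain walk.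


-- ===== PORT A =====
-- inner `while j > 0 and A[i] != A[j]: j = pi[j-1]` of prefix_function; fuel (= initial j) only makes it total
def pvReduceA (A : List Int) (pi : List Nat) (c : Int) : Nat → Nat → Nat
  | 0, j => j
  | f+1, j => if 0 < j ∧ A.getD j 0 ≠ c then pvReduceA A pi c f (pi.getD (j-1) 0) else j

-- the `for i in range(1, n)` loop of prefix_function; the running index i equals pi.length
def pvPiLoop (A : List Int) : Nat → (List Nat × Nat) → (List Nat × Nat)
  | 0, st => st
  | k+1, (pi, j) =>
    let i := pi.length
    let j1 := pvReduceA A pi (A.getD i 0) j j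
    let j2 := if A.getD i 0 = A.getD j1 0 then j1 + 1 else j1
    pvPiLoop A k (pi ++ [j2], j2)

def prefixFunction (A : List Int) : List Nat :=
  if A.length = 0 then [] else (pvPiLoop A (A.length - 1) ([0], 0)).1

-- the `while p > 0: … p = pi[p-1]` border walk of A's outer loop; fuel only makes it total
def pvWalk (pi : List Nat) (length : Nat) : Nat → Nat → Bool
  | 0, _ => false
  | f+1, p =>
    if 0 < p then
      let subSquareLen : Int := 2 * ((length : Int) - (p : Int))
      if subSquareLen ≤ (length : Int) ∧ 2 ≤ subSquareLen then true
      else pvWalk pi length f (pi.getD (p-1) 0)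
    else false

def has_square_subarray (A : List Int) : Bool :=
  let pi := prefixFunction A
  let n := A.length
  (List.range n).any (fun i => pvWalk pi (i+1) n (pi.getD i 0))

-- ===== PORT B =====
-- inner while of B's fused pass; fuel (= initial j) only makes it total
def pvReduceB (A : List Int) (pi : List Nat) (x : Int) : Nat → Nat → Nat
  | 0, j => j
  | f+1, j => if 0 < j ∧ A.getD j 0 ≠ x then pvReduceB A pi x f (pi.getD (j-1) 0) else j

-- B's `for i in range(1, n)` with early return; k counts the remaining iterations
def pvAltGo (A : List Int) : Nat → List Nat → Nat → Nat → Bool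
  | 0, _, _, _ => false
  | k+1, pi, j, i =>
    let j1 := pvReduceB A pi (A.getD i 0) j j
    let j2 := if A.getD i 0 = A.getD j1 0 then j1 + 1 else j1
    if 0 < j2 ∧ i + 1 ≤ 2 * j2 then true
    else pvAltGo A k (pi ++ [j2]) j2 (i+1)

def has_square_subarray_alt (A : List Int) : Bool :=
  pvAltGo A (A.length - 1) [0] 0 1

-- ===== PRECONDITION & SPEC =====
def Spec_has_square_subarray (A : List Int) (out : Bool) : Prop := out = has_square_subarray_alt A
instance (A : List Int) (out : Bool) : Decidable (Spec_has_square_subarray A out) := by unfold Spec_has_square_subarray; infer_instance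

-- ===== CLAIM (what is proved, stated in full; the proofs are below) =====
def Claim_equal_has_square_subarray : Prop := ∀ (A : List Int), Dom_has_square_subarray A → Spec_has_square_subarray A (has_square_subarray A)

-- ===== LEMMAS AND PROOFS =====

-- every entry of a prefix-function table is at most its index
def PiInv (pi : List Nat) : Prop := ∀ k, pi.getD k 0 ≤ k

theorem reduceB_eq_reduceA (A : List Int) (pi : List Nat) (x : Int) :
    ∀ f j, pvReduceB A pi x f j = pvReduceA A pi x f j := by
  intro f
  induction f with
  | zero => intro j; rfl
  | succ f ih => intro j; simp only [pvReduceB, pvReduceA, ih]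

theorem reduceA_le (A : List Int) (pi : List Nat) (c : Int) (hInv : PiInv pi) :
    ∀ f j, pvReduceA A pi c f j ≤ j := by
  intro f
  induction f with
  | zero => intro j; simp [pvReduceA]
  | succ f ih =>
    intro j
    simp only [pvReduceA]
    split
    · rename_i h
      calc pvReduceA A pi c f (pi.getD (j-1) 0) ≤ pi.getD (j-1) 0 := ih _
        _ ≤ j - 1 := hInv _
        _ ≤ j := Nat.sub_le _ _
    · exact le_refl j

theorem piInv_append (pi : List Nat) (j2 : Nat) (hInv : PiInv pi) (hle : j2 ≤ pi.length) :
    PiInv (pi ++ [j2]) := by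
  intro k
  by_cases hk : k < pi.length
  · rw [List.getD_append _ _ _ _ hk]; exact hInv k
  · by_cases hk2 : k = pi.length
    · subst hk2
      rw [List.getD_eq_getElem?_getD]
      simp
      exact hle
    · have : (pi ++ [j2]).length ≤ k := by simp; omega
      rw [List.getD_eq_default _ _ this]
      exact Nat.zero_le k

-- pvPiLoop only appends to the table
theorem piLoop_stable (A : List Int) :
    ∀ k pi j, ∃ rest, (pvPiLoop A k (pi, j)).1 = pi ++ rest := by
  intro k
  induction k with
  | zero => intro pi j; exact ⟨[], by simp [pvPiLoop]⟩
  | succ k ih =>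
    intro pi j
    simp only [pvPiLoop]
    obtain ⟨rest, hr⟩ := ih (pi ++ [if A.getD pi.length 0 = A.getD (pvReduceA A pi (A.getD pi.length 0) j j) 0 then (pvReduceA A pi (A.getD pi.length 0) j j) + 1 else (pvReduceA A pi (A.getD pi.length 0) j j)]) _
    exact ⟨_, by rw [hr, List.append_assoc]⟩

theorem piLoop_inv (A : List Int) :
    ∀ k pi j, PiInv pi → j < pi.length → PiInv ((pvPiLoop A k (pi, j)).1) := by
  intro k
  induction k with
  | zero => intro pi j h _; simpa [pvPiLoop] using h
  | succ k ih =>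
    intro pi j hInv hj
    simp only [pvPiLoop]
    set j1 := pvReduceA A pi (A.getD pi.length 0) j j with hj1
    set j2 := if A.getD pi.length 0 = A.getD j1 0 then j1 + 1 else j1 with hj2
    have hj1le : j1 ≤ j := reduceA_le A pi _ hInv j j
    have hj2le : j2 ≤ pi.length := by
      rw [hj2]; split <;> omega
    have := piInv_append pi j2 hInv hj2le
    exact ih _ j2 this (by simpa using Nat.lt_succ_of_le hj2le)

-- A's border walk returns true exactly when the maximal border p already satisfies length ≤ 2p
theorem walk_eq (pi : List Nat) (i : Nat) (hInv : PiInv pi) :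
    ∀ f p, p ≤ i → p ≤ f → pvWalk pi (i+1) (f+1) p = decide (0 < p ∧ i + 1 ≤ 2 * p) := by
  intro f
  induction f with
  | zero =>
    intro p hpi hpf
    interval_cases p
    simp [pvWalk]
  | succ f ih =>
    intro p hpi hpf
    rcases Nat.eq_zero_or_pos p with hp | hp
    · subst hp; simp [pvWalk]
    · rw [pvWalk, if_pos hp]
      show (if 2 * (((i+1 : Nat) : Int) - (p : Int)) ≤ ((i+1 : Nat) : Int) ∧
              (2:Int) ≤ 2 * (((i+1 : Nat) : Int) - (p : Int)) then true
            else pvWalk pi (i+1) (f+1) (pi.getD (p-1) 0)) = decide (0 < p ∧ i + 1 ≤ 2 * p)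
      by_cases hcond : i + 1 ≤ 2 * p
      · rw [if_pos ⟨by push_cast; omega, by push_cast; omega⟩]
        simp [hp, hcond]
      · rw [if_neg (by push_cast; omega)]
        have hp'le : pi.getD (p-1) 0 ≤ p - 1 := hInv _
        rw [ih (pi.getD (p-1) 0) (by omega) (by omega)]
        simp only [decide_eq_decide]
        omega

theorem piLoop_getD_lt (A : List Int) (k : Nat) (pi : List Nat) (j : Nat) (idx : Nat)
    (h : idx < pi.length) : ((pvPiLoop A k (pi, j)).1).getD idx 0 = pi.getD idx 0 := by
  obtain ⟨rest, hr⟩ := piLoop_stable A k pi j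
  rw [hr, List.getD_append _ _ _ _ h]

-- the common body of one loop step: the new value of j after the inner while and the match test
def stepJ (A : List Int) (pi : List Nat) (j i : Nat) : Nat :=
  if A.getD i 0 = A.getD (pvReduceA A pi (A.getD i 0) j j) 0
  then pvReduceA A pi (A.getD i 0) j j + 1 else pvReduceA A pi (A.getD i 0) j j

theorem stepJ_le (A : List Int) (pi : List Nat) (j i : Nat) (hInv : PiInv pi) :
    stepJ A pi j i ≤ j + 1 := by
  have := reduceA_le A pi (A.getD i 0) hInv j j
  unfold stepJ
  split <;> omega

theorem altGo_succ (A : List Int) (k : Nat) (pi : List Nat) (j i : Nat) :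
    pvAltGo A (k+1) pi j i =
      (if 0 < stepJ A pi j i ∧ i + 1 ≤ 2 * stepJ A pi j i then true
       else pvAltGo A k (pi ++ [stepJ A pi j i]) (stepJ A pi j i) (i+1)) := by
  simp only [pvAltGo, reduceB_eq_reduceA, stepJ]

theorem piLoop_succ (A : List Int) (k : Nat) (pi : List Nat) (j : Nat) :
    pvPiLoop A (k+1) (pi, j) = pvPiLoop A k (pi ++ [stepJ A pi j pi.length], stepJ A pi j pi.length) := by
  simp only [pvPiLoop, stepJ]

-- B's fused loop computes the same answer as scanning the finished table
theorem altGo_eq (A : List Int) :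
    ∀ k pi j, PiInv pi → j < pi.length →
    pvAltGo A k pi j pi.length =
      (List.range' pi.length k).any (fun t =>
        decide (0 < ((pvPiLoop A k (pi, j)).1).getD t 0 ∧
                t + 1 ≤ 2 * ((pvPiLoop A k (pi, j)).1).getD t 0)) := by
  intro k
  induction k with
  | zero => intro pi j _ _; simp [pvAltGo]
  | succ k ih =>
    intro pi j hInv hj
    rw [altGo_succ, piLoop_succ, List.range'_succ, List.any_cons]
    set J := stepJ A pi j pi.length with hJ
    have hJle : J ≤ pi.length := by
      have := stepJ_le A pi j pi.length hInv
      omega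
    have hInv' : PiInv (pi ++ [J]) := piInv_append pi J hInv hJle
    have hgetd : ((pvPiLoop A k (pi ++ [J], J)).1).getD pi.length 0 = J := by
      rw [piLoop_getD_lt A k _ J pi.length (by simp)]
      rw [List.getD_eq_getElem?_getD]
      simp
    rw [hgetd]
    by_cases hc : 0 < J ∧ pi.length + 1 ≤ 2 * J
    · rw [if_pos hc, decide_eq_true hc, Bool.true_or]
    · rw [if_neg hc, decide_eq_false hc, Bool.false_or]
      have hrec := ih (pi ++ [J]) J hInv' (by simpa using Nat.lt_succ_of_le hJle)
      simp only [List.length_append, List.length_cons, List.length_nil] at hrec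
      exact hrec

theorem prefixFunction_inv (A : List Int) : PiInv (prefixFunction A) := by
  unfold prefixFunction
  split
  · intro k; simp
  · apply piLoop_inv
    · intro k; cases k <;> simp [List.getD]
    · simp

theorem prefixFunction_head (A : List Int) (h : A.length ≠ 0) :
    (prefixFunction A).getD 0 0 = 0 := by
  unfold prefixFunction
  rw [if_neg h]
  rw [piLoop_getD_lt A _ _ _ 0 (by simp)]
  rfl

-- ===== VERDICT (by name: the statement is the Claim_ definition above) =====
theorem has_square_subarray_spec : Claim_equal_has_square_subarray := by
  intro A _
  unfold Spec_has_square_subarray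
  unfold has_square_subarray has_square_subarray_alt
  set F := prefixFunction A with hF
  have hInv : PiInv F := prefixFunction_inv A
  rcases Nat.eq_zero_or_pos A.length with hn | hn
  · rw [hn]
    simp [pvAltGo]
  · -- A side: rewrite each border walk into the maximal-border test
    have hA : (List.range A.length).any (fun i => pvWalk F (i+1) A.length (F.getD i 0)) =
        (List.range A.length).any (fun i => decide (0 < F.getD i 0 ∧ i + 1 ≤ 2 * F.getD i 0)) := by
      apply PySem.List.any_congr_mem
      intro i hi
      rw [List.mem_range] at hi
      have hp : F.getD i 0 ≤ i := hInv i
      have hnn : A.length = (A.length - 1) + 1 := by omega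
      rw [hnn]
      exact walk_eq F i hInv (A.length - 1) (F.getD i 0) hp (by omega)
    rw [hA]
    -- split off index 0, where the test is false
    have hr : List.range A.length = 0 :: List.range' 1 (A.length - 1) := by
      conv_lhs => rw [List.range_eq_range', show A.length = (A.length - 1) + 1 from by omega,
        List.range'_succ]
    rw [hr, List.any_cons]
    have h0 : F.getD 0 0 = 0 := prefixFunction_head A (by omega)
    have hhead : decide (0 < F.getD 0 0 ∧ 0 + 1 ≤ 2 * F.getD 0 0) = false := by
      rw [h0]; simp
    rw [hhead, Bool.false_or]
    -- B side
    have hB := altGo_eq A (A.length - 1) [0] 0 (by intro k; cases k <;> simp [List.getD]) (by simp)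
    simp only [List.length_cons, List.length_nil] at hB
    rw [hB]
    have hFdef : F = (pvPiLoop A (A.length - 1) ([0], 0)).1 := by
      rw [hF]; unfold prefixFunction; rw [if_neg (by omega)]
    rw [← hFdef]
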